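-- pv_equiv track=rewrite | github.com/AxtonH/NasmaTest | backend/services/log_hours_flow.py | _match_activity_name
-- ===== SOURCE A (Python) =====
-- from typing import Dict, Any, List, Tuple, Set, Optional
--
-- def _match_activity_name(text: str, activity_options: List[Dict]) -> Optional[str]:
--     """
--     Match user text input to an activity option by name (case-insensitive).
--
--     Args:
--         text: User input text
--         activity_options: List of activity dicts with 'value' and 'label' keys
--
--     Returns:
--         Activity ID (value) if match found, None otherwise
--     """
--     if not text or not activity_options:
--         return None
--
--     text_lower = text.strip().lower()
--
--     # Exact match (case-insensitive)
--     for opt in activity_options: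
--         label = opt.get('label', '').strip().lower()
--         if label == text_lower:
--             return opt.get('value')
--
--     # Partial match (contains)
--     for opt in activity_options:
--         label = opt.get('label', '').strip().lower()
--         if text_lower in label or label in text_lower:
--             return opt.get('value')
--
--     return None
-- ===== SOURCE B (Python) =====
-- from typing import Dict, Any, List, Tuple, Set, Optional
--
-- def _match_activity_name(text: str, activity_options: List[Dict]) -> Optional[str]:
--     # Single pass: return immediately on an exact label match; remember the
--     # first partial match and fall back to it only after the whole scan,
--     # so a later exact match still wins over an earlier partial one.
--     if not text or not activity_options:
--         return None
--     text_lower = text.strip().lower()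
--     have_partial = False
--     partial = None
--     for opt in activity_options:
--         label = opt.get('label', '').strip().lower()
--         if label == text_lower:
--             return opt.get('value')
--         if not have_partial and (text_lower in label or label in text_lower):
--             have_partial = True
--             partial = opt.get('value')
--     return partial
-- ===== Notes on version B (the rewrite author's own statement) =====
-- stated objective: alternative
-- what changed: Replaces A's two sequential scans (exact pass, then partial pass) with a single loop that returns on the first exact match while remembering the first partial candidate for a post-loop fallback.
import Mathlib
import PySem

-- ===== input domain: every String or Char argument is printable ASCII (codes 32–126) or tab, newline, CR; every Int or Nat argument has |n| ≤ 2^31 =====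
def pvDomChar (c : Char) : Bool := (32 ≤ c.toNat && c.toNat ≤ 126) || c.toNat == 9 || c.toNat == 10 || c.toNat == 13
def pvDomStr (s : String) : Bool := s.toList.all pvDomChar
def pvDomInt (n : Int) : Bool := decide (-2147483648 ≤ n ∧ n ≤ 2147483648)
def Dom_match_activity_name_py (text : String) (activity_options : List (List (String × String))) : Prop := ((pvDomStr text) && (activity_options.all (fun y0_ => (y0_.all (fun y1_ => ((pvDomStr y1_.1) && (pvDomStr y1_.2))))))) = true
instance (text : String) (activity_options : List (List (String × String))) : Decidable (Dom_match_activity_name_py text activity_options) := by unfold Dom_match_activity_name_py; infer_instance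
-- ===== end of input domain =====

-- ===== PORT A =====
-- Two-pass scan: exact-match loop, then partial-match loop (literal port of A).
def pvNorm (s : String) : String := PySem.Str.lower (PySem.Str.strip s)

def pvAExact (tl : String) : List (List (String × String)) → Option (Option String)
  | [] => none
  | opt :: rest =>
    if pvNorm ((PySem.Dict.mk opt).getD "label" "") = tl
    then some ((PySem.Dict.mk opt).get? "value")
    else pvAExact tl rest

def pvAPartial (tl : String) : List (List (String × String)) → Option (Option String)
  | [] => none
  | opt :: rest =>
    let label := pvNorm ((PySem.Dict.mk opt).getD "label" "")
    if PySem.Str.isIn tl label || PySem.Str.isIn label tl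
    then some ((PySem.Dict.mk opt).get? "value")
    else pvAPartial tl rest

def match_activity_name_py (text : String) (activity_options : List (List (String × String))) : Option String :=
  if text = "" ∨ activity_options = [] then none
  else
    let tl := pvNorm text
    match pvAExact tl activity_options with
    | some v => v
    | none =>
      match pvAPartial tl activity_options with
      | some v => v
      | none => none

-- ===== PORT B =====
-- Single pass: return on first exact match, remember first partial candidate.
def pvBGo (tl : String) (havePartial : Bool) (part : Option String) :
    List (List (String × String)) → Option String
  | [] => part
  | opt :: rest =>
    let label := pvNorm ((PySem.Dict.mk opt).getD "label" "")
    if label = tl then (PySem.Dict.mk opt).get? "value"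
    else if !havePartial && (PySem.Str.isIn tl label || PySem.Str.isIn label tl)
    then pvBGo tl true ((PySem.Dict.mk opt).get? "value") rest
    else pvBGo tl havePartial part rest

def match_activity_name_py_alt (text : String) (activity_options : List (List (String × String))) : Option String :=
  if text = "" ∨ activity_options = [] then none
  else pvBGo (pvNorm text) false none activity_options

-- ===== PRECONDITION & SPEC =====
def Spec_match_activity_name_py (text : String) (activity_options : List (List (String × String))) (out : Option String) : Prop := out = match_activity_name_py_alt text activity_options
instance (text : String) (activity_options : List (List (String × String))) (out : Option String) : Decidable (Spec_match_activity_name_py text activity_options out) := by unfold Spec_match_activity_name_py; infer_instance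

-- ===== CLAIM (what is proved, stated in full; the proofs are below) =====
def Claim_equal_match_activity_name_py : Prop := ∀ (text : String) (activity_options : List (List (String × String))), Dom_match_activity_name_py text activity_options → Spec_match_activity_name_py text activity_options (match_activity_name_py text activity_options)

-- ===== LEMMAS AND PROOFS =====
-- Loop invariant for B's single pass: with the first-partial candidate recorded in
-- (havePartial, part), pvBGo computes "first exact match in l, else the stored/first partial".
set_option maxHeartbeats 1000000 in
lemma pvBGo_eq (tl : String) (l : List (List (String × String))) :
    ∀ (hp : Bool) (p : Option String), (hp = false → p = none) →
    pvBGo tl hp p l =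
      (pvAExact tl l).getD (if hp then p else (pvAPartial tl l).getD none) := by
  induction l with
  | nil =>
    intro hp p hinv
    cases hp with
    | false => simp [pvBGo, pvAExact, pvAPartial, hinv rfl]
    | true => simp [pvBGo, pvAExact]
  | cons opt rest ih =>
    intro hp p hinv
    by_cases hex : pvNorm ((PySem.Dict.mk opt).getD "label" "") = tl
    · simp only [pvBGo, pvAExact, hex, if_true, Option.getD_some]
    · by_cases hpart : (PySem.Str.isIn tl (pvNorm ((PySem.Dict.mk opt).getD "label" "")) ||
          PySem.Str.isIn (pvNorm ((PySem.Dict.mk opt).getD "label" "")) tl) = true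
      · cases hp with
        | false =>
          simp only [pvBGo, pvAExact, pvAPartial, hex, hpart, Bool.not_false, Bool.true_and,
            if_false, if_true]
          rw [ih true _ (by simp)]
          simp
        | true =>
          simp only [pvBGo, pvAExact, pvAPartial, hex, Bool.not_true, Bool.false_and,
            if_false, Bool.false_eq_true]
          rw [ih true p (by simp)]
          simp
      · simp only [Bool.not_eq_true] at hpart
        simp only [pvBGo, pvAExact, pvAPartial, hex, hpart, Bool.and_false, if_false,
          Bool.false_eq_true]
        rw [ih hp p hinv]

-- ===== VERDICT (by name: the statement is the Claim_ definition above) =====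
set_option maxHeartbeats 1000000 in
theorem match_activity_name_py_spec : Claim_equal_match_activity_name_py := by
  intro text activity_options _
  unfold Spec_match_activity_name_py match_activity_name_py match_activity_name_py_alt
  by_cases hg : text = "" ∨ activity_options = []
  · simp [hg]
  · simp only [hg, if_false]
    rw [pvBGo_eq (pvNorm text) activity_options false none (fun _ => rfl)]
    simp only [Bool.false_eq_true, if_false]
    cases pvAExact (pvNorm text) activity_options <;>
      cases pvAPartial (pvNorm text) activity_options <;> simp
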